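-- pv_equiv track=rewrite | github.com/checksumHashi/racunarski-alati | Vezbe_2022_23/vezbe_09/6.py | meow
-- ===== SOURCE A (Python) =====
-- def meow(s: str) -> str:
--     dicti = {}
--     maxi = 0
--     maxichar = ''
--
--     for char in s:
--         if char in dicti:
--             dicti[char] += 1
--             counted = dicti[char]
--             if counted > maxi:
--                 maxi = counted
--                 maxichar = char
--         dicti.update({char:s.count(char)})
--
--     return maxichar
-- ===== SOURCE B (Python) =====
-- def meow(s: str) -> str:
--     counts = {}
--     for ch in s:
--         counts[ch] = counts.get(ch, 0) + 1
--     best = ''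
--     best_count = 0
--     seen = set()
--     decided = set()
--     for ch in s:
--         if ch in seen and ch not in decided:
--             decided.add(ch)
--             if counts[ch] > best_count:
--                 best_count = counts[ch]
--                 best = ch
--         seen.add(ch)
--     return best
-- ===== Notes on version B (the rewrite author's own statement) =====
-- stated objective: faster
-- what changed: Replaces the per-character s.count rescans and live max-tracking dict with one counting pass plus one scan that considers each character exactly once at its second occurrence (seen/decided sets).
import Mathlib
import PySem

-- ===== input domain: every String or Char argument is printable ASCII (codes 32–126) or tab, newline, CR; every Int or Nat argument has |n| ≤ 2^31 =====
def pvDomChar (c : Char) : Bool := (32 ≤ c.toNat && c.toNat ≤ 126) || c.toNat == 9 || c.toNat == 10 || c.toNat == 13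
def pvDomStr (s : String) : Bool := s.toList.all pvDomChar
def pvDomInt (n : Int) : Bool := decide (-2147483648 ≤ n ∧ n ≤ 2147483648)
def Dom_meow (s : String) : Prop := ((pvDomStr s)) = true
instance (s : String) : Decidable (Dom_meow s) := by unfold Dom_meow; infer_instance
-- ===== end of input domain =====

-- B replaces A's per-character `s.count` rescans and live max-tracking dict with one counting
-- pass plus one scan that decides each character once, at its second occurrence (objective: faster).

-- ===== PORT A =====
-- one iteration of A's loop: state (dicti, maxi, maxichar)
def meowStepA (s : String) (st : PySem.Dict Char Int × Int × String) (ch : Char) :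
    PySem.Dict Char Int × Int × String :=
  let st' :=
    if st.1.contains ch then
      let dicti' := st.1.modify ch 0 (· + 1)      -- dicti[char] += 1 (key present here)
      let counted := dicti'.getD ch 0
      if counted > st.2.1 then (dicti', counted, String.ofList [ch])
      else (dicti', st.2.1, st.2.2)
    else st
  (st'.1.insert ch ((PySem.Str.count s (String.ofList [ch]) : Int)), st'.2.1, st'.2.2)

def meow (s : String) : String :=
  (s.toList.foldl (meowStepA s) (PySem.Dict.empty, 0, "")).2.2

-- ===== PORT B =====
-- one iteration of B's second loop: state (best, best_count, seen, decided)
def meowStepB (counts : PySem.Dict Char Int) (st : String × Int × PySem.Set Char × PySem.Set Char)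
    (ch : Char) : String × Int × PySem.Set Char × PySem.Set Char :=
  if PySem.Set.contains st.2.2.1 ch && !PySem.Set.contains st.2.2.2 ch then
    let decided' := PySem.Set.add st.2.2.2 ch
    let c := counts.getD ch 0                     -- counts[ch] (key always present here)
    if c > st.2.1 then (String.ofList [ch], c, PySem.Set.add st.2.2.1 ch, decided')
    else (st.1, st.2.1, PySem.Set.add st.2.2.1 ch, decided')
  else (st.1, st.2.1, PySem.Set.add st.2.2.1 ch, st.2.2.2)

def meow_alt (s : String) : String :=
  let counts := s.toList.foldl
    (fun (d : PySem.Dict Char Int) ch => d.insert ch (d.getD ch 0 + 1)) PySem.Dict.empty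
  (s.toList.foldl (meowStepB counts) ("", 0, PySem.Set.empty, PySem.Set.empty)).1

-- ===== PRECONDITION & SPEC =====
def Spec_meow (s : String) (out : String) : Prop := out = meow_alt s
instance (s : String) (out : String) : Decidable (Spec_meow s out) := by unfold Spec_meow; infer_instance

-- ===== CLAIM (what is proved, stated in full; the proofs are below) =====
def Claim_equal_meow : Prop := ∀ (s : String), Dom_meow s → Spec_meow s (meow s)

-- ===== LEMMAS AND PROOFS =====

theorem meow_count_go (c : Char) : ∀ (fuel : Nat) (cs : List Char) (acc : Nat),
    cs.length ≤ fuel → PySem.Chars.count.go [c] fuel cs acc = acc + cs.count c := by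
  intro fuel
  induction fuel with
  | zero =>
    intro cs acc h
    have : cs = [] := List.eq_nil_of_length_eq_zero (Nat.le_zero.mp h)
    subst this; rfl
  | succ f ih =>
    intro cs acc h
    cases cs with
    | nil => rfl
    | cons hd t =>
      have hstep : PySem.Chars.count.go [c] (f+1) (hd::t) acc
          = if ([c] : List Char).isPrefixOf (hd::t) then PySem.Chars.count.go [c] f t (acc+1)
            else PySem.Chars.count.go [c] f t acc := rfl
      rw [hstep]
      have hl : t.length ≤ f := by simpa using h
      by_cases hc : c = hd
      · subst hc
        simp [List.isPrefixOf, ih _ _ hl]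
        omega
      · simp [List.isPrefixOf, hc, ih _ _ hl, Ne.symm hc]

theorem meow_count_single (cs : List Char) (c : Char) :
    PySem.Chars.count cs [c] = cs.count c := by
  simp only [PySem.Chars.count, List.isEmpty_cons, Bool.false_eq_true, reduceIte]
  simpa using meow_count_go c cs.length cs 0 (le_refl _)

-- the invariant relating A's state, after the processed prefix p of cs, to B's state
def meowInv (cs p : List Char) (dicti : PySem.Dict Char Int) (maxi : Int) (maxichar : String)
    (best : String) (bestc : Int) (seen decided : PySem.Set Char) : Prop :=
  (∀ ch, dicti.contains ch = true ↔ ch ∈ p) ∧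
  (∀ ch, ch ∈ p → dicti.getD ch 0 = (cs.count ch : Int)) ∧
  (∀ ch, ch ∈ seen ↔ ch ∈ p) ∧
  (∀ ch, ch ∈ decided ↔ 2 ≤ p.count ch) ∧
  maxichar = best ∧
  (maxi = if bestc = 0 then 0 else bestc + 1) ∧
  (∀ ch, ch ∈ decided → (cs.count ch : Int) ≤ bestc)

theorem meow_main (s : String) (cs : List Char)
    (hv : ∀ ch : Char, (PySem.Str.count s (String.ofList [ch]) : Int) = (cs.count ch : Int)) :
    ∀ (rest p : List Char), cs = p ++ rest →
    ∀ (dicti : PySem.Dict Char Int) (maxi : Int) (maxichar best : String) (bestc : Int)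
      (seen decided : PySem.Set Char) (counts : PySem.Dict Char Int),
    (∀ ch, counts.getD ch 0 = (cs.count ch : Int)) →
    meowInv cs p dicti maxi maxichar best bestc seen decided →
    (rest.foldl (meowStepA s) (dicti, maxi, maxichar)).2.2
      = (rest.foldl (meowStepB counts) (best, bestc, seen, decided)).1 := by
  intro rest
  induction rest with
  | nil =>
    intro p h dicti maxi maxichar best bestc seen decided counts hc hinv
    exact hinv.2.2.2.2.1
  | cons ch rest ih =>
    intro p h dicti maxi maxichar best bestc seen decided counts hc hinv
    obtain ⟨h1, h2, h3, h4, h5, h6, h7⟩ := hinv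
    have hsplit : cs = (p ++ [ch]) ++ rest := by simpa [List.append_assoc] using h
    have hcapp_self : (p ++ [ch]).count ch = p.count ch + 1 := by simp
    have hcapp_ne : ∀ c, c ≠ ch → (p ++ [ch]).count c = p.count c := by
      intro c hcc; simp [List.count_append, Ne.symm hcc]
    by_cases hp : ch ∈ p
    · -- repeat occurrence
      have hcontA : dicti.contains ch = true := (h1 ch).mpr hp
      have hseen : ch ∈ seen := (h3 ch).mpr hp
      have hgetD : dicti.getD ch 0 = (cs.count ch : Int) := h2 ch hp
      have hcnt1 : 1 ≤ cs.count ch := by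
        subst h
        exact List.count_pos_iff.mpr (List.mem_append.mpr (Or.inl hp))
      have hinv1' : ∀ c, ((dicti.modify ch 0 (· + 1)).insert ch
            ((PySem.Str.count s (String.ofList [ch]) : Int))).contains c = true ↔ c ∈ p ++ [ch] := by
        intro c
        rw [PySem.Dict.contains_insert, PySem.Dict.contains_modify]
        by_cases hcc : c = ch <;> simp [hcc, h1, hp]
      have hinv2' : ∀ c, c ∈ p ++ [ch] → ((dicti.modify ch 0 (· + 1)).insert ch
            ((PySem.Str.count s (String.ofList [ch]) : Int))).getD c 0 = (cs.count c : Int) := by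
        intro c hcmem
        by_cases hcc : c = ch
        · subst hcc; rw [PySem.Dict.getD_insert_self, hv]
        · rw [PySem.Dict.getD_insert_of_ne _ _ _ hcc, PySem.Dict.getD_modify_of_ne _ _ _ hcc]
          exact h2 c (by rcases List.mem_append.mp hcmem with h' | h'
                         · exact h'
                         · exact absurd (List.mem_singleton.mp h') hcc)
      have hinv3' : ∀ c, c ∈ PySem.Set.add seen ch ↔ c ∈ p ++ [ch] := by
        intro c
        rw [PySem.Set.mem_add]
        by_cases hcc : c = ch <;> simp [hcc, h3, hp]
      by_cases hd : ch ∈ decided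
      · -- third-or-later occurrence: neither side changes (max, best)
        have hple : (cs.count ch : Int) ≤ bestc := h7 ch hd
        have hb0 : bestc ≠ 0 := by intro h0; rw [h0] at hple; omega
        have hno : ¬ maxi ≤ dicti.getD ch 0 := by rw [hgetD, h6, if_neg hb0]; omega
        have hA : meowStepA s (dicti, maxi, maxichar) ch
            = ((dicti.modify ch 0 (· + 1)).insert ch ((PySem.Str.count s (String.ofList [ch]) : Int)),
               maxi, maxichar) := by
          simp [meowStepA, hcontA, hno]
        have hB : meowStepB counts (best, bestc, seen, decided) ch
            = (best, bestc, PySem.Set.add seen ch, decided) := by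
          simp [meowStepB, hseen, hd]
        rw [List.foldl_cons, List.foldl_cons, hA, hB]
        apply ih (p ++ [ch]) hsplit _ _ _ _ _ _ _ _ hc
        refine ⟨hinv1', hinv2', hinv3', ?_, h5, h6, h7⟩
        intro c
        by_cases hcc : c = ch
        · subst hcc
          rw [hcapp_self, h4]
          have := (h4 c).mp hd
          omega
        · rw [hcapp_ne c hcc, h4]
      · -- second occurrence: both sides test and possibly update
        have hpc1 : p.count ch = 1 := by
          have hge : 1 ≤ p.count ch := List.count_pos_iff.mpr hp
          have hlt : ¬ (2 ≤ p.count ch) := fun hh => hd ((h4 ch).mpr hh)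
          omega
        have hcond : (maxi ≤ dicti.getD ch 0) ↔ (bestc < counts.getD ch 0) := by
          rw [hgetD, hc, h6]
          split_ifs with hb0 <;> omega
        have hinv4' : ∀ c, c ∈ PySem.Set.add decided ch ↔ 2 ≤ (p ++ [ch]).count c := by
          intro c
          by_cases hcc : c = ch
          · subst hcc; simp [PySem.Set.mem_add, hcapp_self, hpc1]
          · rw [PySem.Set.mem_add, hcapp_ne c hcc, h4]
            simp [hcc]
        by_cases hgt : bestc < counts.getD ch 0
        · -- both update
          have hyes : maxi ≤ dicti.getD ch 0 := hcond.mpr hgt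
          have hA : meowStepA s (dicti, maxi, maxichar) ch
              = ((dicti.modify ch 0 (· + 1)).insert ch ((PySem.Str.count s (String.ofList [ch]) : Int)),
                 dicti.getD ch 0 + 1, String.ofList [ch]) := by
            simp [meowStepA, hcontA, hyes]
          have hB : meowStepB counts (best, bestc, seen, decided) ch
              = (String.ofList [ch], counts.getD ch 0, PySem.Set.add seen ch, PySem.Set.add decided ch) := by
            simp [meowStepB, hseen, hd, hgt]
          rw [List.foldl_cons, List.foldl_cons, hA, hB]
          apply ih (p ++ [ch]) hsplit _ _ _ _ _ _ _ _ hc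
          refine ⟨hinv1', hinv2', hinv3', hinv4', rfl, ?_, ?_⟩
          · rw [hgetD, hc]
            have hne : ¬ ((cs.count ch : Int) = 0) := by omega
            rw [if_neg hne]
          · intro c hcmem
            rcases (PySem.Set.mem_add decided ch c).mp hcmem with hcd | hceq
            · have := h7 c hcd
              rw [hc] at hgt; omega
            · subst hceq; rw [hc]
        · -- neither updates
          have hno : ¬ maxi ≤ dicti.getD ch 0 := fun hh => hgt (hcond.mp hh)
          have hA : meowStepA s (dicti, maxi, maxichar) ch
              = ((dicti.modify ch 0 (· + 1)).insert ch ((PySem.Str.count s (String.ofList [ch]) : Int)),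
                 maxi, maxichar) := by
            simp [meowStepA, hcontA, hno]
          have hB : meowStepB counts (best, bestc, seen, decided) ch
              = (best, bestc, PySem.Set.add seen ch, PySem.Set.add decided ch) := by
            simp [meowStepB, hseen, hd, hgt]
          rw [List.foldl_cons, List.foldl_cons, hA, hB]
          apply ih (p ++ [ch]) hsplit _ _ _ _ _ _ _ _ hc
          refine ⟨hinv1', hinv2', hinv3', hinv4', h5, h6, ?_⟩
          intro c hcmem
          rcases (PySem.Set.mem_add decided ch c).mp hcmem with hcd | hceq
          · exact h7 c hcd
          · subst hceq; rw [hc] at hgt; omega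
    · -- first occurrence
      have hcontA : dicti.contains ch = false := by
        rw [← Bool.not_eq_true]; intro hh; exact hp ((h1 ch).mp hh)
      have hns : ch ∉ seen := fun hh => hp ((h3 ch).mp hh)
      have hA : meowStepA s (dicti, maxi, maxichar) ch
          = (dicti.insert ch ((PySem.Str.count s (String.ofList [ch]) : Int)), maxi, maxichar) := by
        simp [meowStepA, hcontA]
      have hB : meowStepB counts (best, bestc, seen, decided) ch
          = (best, bestc, PySem.Set.add seen ch, decided) := by
        simp [meowStepB, hns]
      rw [List.foldl_cons, List.foldl_cons, hA, hB]
      apply ih (p ++ [ch]) hsplit _ _ _ _ _ _ _ _ hc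
      have hp0 : p.count ch = 0 := List.count_eq_zero.mpr hp
      refine ⟨?_, ?_, ?_, ?_, h5, h6, h7⟩
      · intro c
        rw [PySem.Dict.contains_insert]
        by_cases hcc : c = ch <;> simp [hcc, h1]
      · intro c hcmem
        by_cases hcc : c = ch
        · subst hcc; rw [PySem.Dict.getD_insert_self, hv]
        · rw [PySem.Dict.getD_insert_of_ne _ _ _ hcc]
          exact h2 c (by rcases List.mem_append.mp hcmem with h' | h'
                         · exact h'
                         · exact absurd (List.mem_singleton.mp h') hcc)
      · intro c
        rw [PySem.Set.mem_add]
        by_cases hcc : c = ch <;> simp [hcc, h3]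
      · intro c
        by_cases hcc : c = ch
        · subst hcc; rw [hcapp_self, hp0, h4, hp0]; omega
        · rw [hcapp_ne c hcc, h4]

-- ===== VERDICT (by name: the statement is the Claim_ definition above) =====
theorem meow_spec : Claim_equal_meow := by
  intro s _
  unfold Spec_meow meow meow_alt
  have hv : ∀ ch : Char, (PySem.Str.count s (String.ofList [ch]) : Int) = (s.toList.count ch : Int) := by
    intro ch
    rw [PySem.Str.count_eq]
    simp [meow_count_single]
  have hc : ∀ ch : Char,
      (s.toList.foldl (fun (d : PySem.Dict Char Int) ch => d.insert ch (d.getD ch 0 + 1))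
        PySem.Dict.empty).getD ch 0 = (s.toList.count ch : Int) := by
    intro ch
    rw [PySem.Dict.getD_foldl_insert_add_one]
    simp
  exact meow_main s s.toList hv s.toList [] rfl PySem.Dict.empty 0 "" "" 0
    PySem.Set.empty PySem.Set.empty _ hc
    ⟨by simp [PySem.Dict.contains_empty], by simp, by simp [PySem.Set.empty], by simp [PySem.Set.empty],
     rfl, by simp, by simp [PySem.Set.empty]⟩
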